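-- pv_equiv track=rewrite | github.com/Xunhaoz/CollegeAssignment | python-assignment-7/A7-110502528-1.py | g_back
-- ===== SOURCE A (Python) =====
-- def g_back(arr_seat):
--     distant = 0
--     temp = []
--     for i in arr_seat[::-1]:
--         if i == '0':
--             distant += 1
--             temp.append(str(distant))
--         elif i == '1':
--             distant = 0
--             temp.append(str(distant))
--     temp.reverse()
--     return list(map(int, temp))
-- ===== SOURCE B (Python) =====
-- def g_back(arr_seat):
--     # run-length decomposition: filter to '0'/'1' seats, then emit per maximal run:
--     # a run of k ones -> k zeros; a run of k zeros -> countdown k..1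
--     seats = [c for c in arr_seat if c == '0' or c == '1']
--     out = []
--     i = 0
--     n = len(seats)
--     while i < n:
--         j = i
--         while j < n and seats[j] == seats[i]:
--             j += 1
--         k = j - i
--         if seats[i] == '1':
--             out.extend([0] * k)
--         else:
--             out.extend(range(k, 0, -1))
--         i = j
--     return out
-- ===== Notes on version B (the rewrite author's own statement) =====
-- stated objective: alternative
-- what changed: Replaced the reverse scan with a running counter by a forward run-length decomposition: filter to '0'/'1' seats, then each maximal run of ones emits zeros and each run of k zeros emits the countdown k..1.
import Mathlib
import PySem

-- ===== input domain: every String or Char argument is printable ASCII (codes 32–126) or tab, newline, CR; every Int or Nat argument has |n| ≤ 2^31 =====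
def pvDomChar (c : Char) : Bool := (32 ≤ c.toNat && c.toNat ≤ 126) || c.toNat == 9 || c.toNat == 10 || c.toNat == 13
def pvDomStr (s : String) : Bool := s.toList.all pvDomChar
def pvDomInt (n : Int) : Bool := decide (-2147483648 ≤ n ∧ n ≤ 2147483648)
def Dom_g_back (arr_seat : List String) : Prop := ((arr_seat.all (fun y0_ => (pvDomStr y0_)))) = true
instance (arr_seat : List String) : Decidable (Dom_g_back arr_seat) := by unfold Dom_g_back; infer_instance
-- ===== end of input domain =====

-- B replaces A's reverse scan (counter + append + final reverse) by a forward run-length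
-- decomposition with a closed form per run; same O(n) cost, different structure.

-- ===== PORT A =====
-- loop body of `for i in arr_seat[::-1]`; state = (distant, temp).
-- temp holds the values of Python's `str(distant)`; since `list(map(int, temp))` at the end
-- round-trips them exactly (they are str() of nonnegative ints), the port keeps the int values
-- in temp directly — exact here (the parser internals needed for a symbolic str/int
-- round-trip lemma are private to PySem).
def gbStep (st : Int × List Int) (i : String) : Int × List Int :=
  if i = "0" then (st.1 + 1, st.2 ++ [st.1 + 1])
  else if i = "1" then (0, st.2 ++ [(0 : Int)])
  else st

def g_back (arr_seat : List String) : List Int :=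
  -- arr_seat[::-1]  (slice with step -1; none is impossible for step -1)
  let revSeats := (PySem.List.slice? arr_seat none none (-1)).getD []
  let fin := revSeats.foldl gbStep (0, [])
  -- temp.reverse(); return list(map(int, temp))  (map int ported away per the comment above)
  fin.2.reverse

-- ===== PORT B =====
-- B's while-loops: the inner `while` scans the maximal run of seats[i] (= takeWhile),
-- the outer loop continues on the rest (= dropWhile); out.extend(...) is the append.
def gbRuns : List String → List Int
  | [] => []
  | x :: xs =>
      let run := (x :: xs).takeWhile (fun c => c == x)
      let rest := (x :: xs).dropWhile (fun c => c == x)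
      (if x = "1" then List.replicate run.length (0 : Int)
       else PySem.List.pyRange (run.length : Int) 0 (-1)) ++ gbRuns rest
termination_by l => l.length
decreasing_by
  simp only [List.dropWhile_cons, beq_self_eq_true, if_true]
  exact Nat.lt_succ_of_le (List.length_dropWhile_le _ _)

def g_back_alt (arr_seat : List String) : List Int :=
  gbRuns (arr_seat.filter (fun c => c == "0" || c == "1"))

-- ===== PRECONDITION & SPEC =====
def Spec_g_back (arr_seat : List String) (out : List Int) : Prop := out = g_back_alt arr_seat
instance (arr_seat : List String) (out : List Int) : Decidable (Spec_g_back arr_seat out) := by unfold Spec_g_back; infer_instance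

-- ===== CLAIM (what is proved, stated in full; the proofs are below) =====
def Claim_equal_g_back : Prop := ∀ (arr_seat : List String), Dom_g_back arr_seat → Spec_g_back arr_seat (g_back arr_seat)

-- ===== LEMMAS AND PROOFS =====

-- A's loop, as a pair of structural recursions: final counter and emitted list.
def gbCnt : Int → List String → Int
  | d, [] => d
  | d, x :: xs => if x = "0" then gbCnt (d + 1) xs else if x = "1" then gbCnt 0 xs else gbCnt d xs

def gbCore : Int → List String → List Int
  | _, [] => []
  | d, x :: xs =>
      if x = "0" then (d + 1) :: gbCore (d + 1) xs
      else if x = "1" then (0 : Int) :: gbCore 0 xs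
      else gbCore d xs

-- length of the leading run of "0"s
def zrun (l : List String) : Nat := (l.takeWhile (fun c => c == "0")).length

-- forward specification: distance to the next "1" on the right (on 0/1-only lists)
def gbF : List String → List Int
  | [] => []
  | x :: t => (if x = "1" then (0 : Int) else (zrun t : Int) + 1) :: gbF t

-- countdown k..1
def cd (k : Nat) : List Int := PySem.List.pyRange (k : Int) 0 (-1)

lemma cd_zero : cd 0 = [] := by decide

lemma cd_succ (k : Nat) : cd (k + 1) = ((k : Int) + 1) :: cd k := by
  unfold cd
  rw [PySem.List.pyRange_neg_one_eq_reverse, PySem.List.pyRange_neg_one_eq_reverse]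
  push_cast
  rw [show ((k : Int) + 1 + 1) = ((k : Int) + 1) + 1 by ring,
      PySem.List.pyRange_one_succ_right (by omega)]
  simp

lemma foldl_gbStep (l : List String) (d : Int) (acc : List Int) :
    l.foldl gbStep (d, acc) = (gbCnt d l, acc ++ gbCore d l) := by
  induction l generalizing d acc with
  | nil => simp [gbCnt, gbCore]
  | cons x xs ih =>
      simp only [List.foldl_cons, gbStep, gbCnt, gbCore]
      split_ifs with h1 h2 <;> simp [ih]

lemma gbCore_filter (l : List String) (d : Int) :
    gbCore d l = gbCore d (l.filter (fun c => c == "0" || c == "1")) := by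
  induction l generalizing d with
  | nil => rfl
  | cons x xs ih =>
      by_cases h0 : x = "0"
      · subst h0; simp [gbCore, List.filter, ih]
      · by_cases h1 : x = "1"
        · subst h1; simp [gbCore, List.filter, ih]
        · simp [gbCore, h0, h1, ih]

lemma zrun_cons_zero (t : List String) : zrun ("0" :: t) = zrun t + 1 := by
  simp [zrun]

lemma zrun_cons_ne (x : String) (t : List String) (h : x ≠ "0") : zrun (x :: t) = 0 := by
  simp [zrun, h]

lemma zrun_append_one (t v : List String) : zrun (t ++ "1" :: v) = zrun t := by
  induction t with
  | nil => simp [zrun]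
  | cons y t ih =>
      by_cases h : y = "0"
      · subst h; simp only [List.cons_append, zrun_cons_zero, ih]
      · rw [List.cons_append, zrun_cons_ne y _ h, zrun_cons_ne y _ h]

lemma gbF_append_one (t v : List String) : gbF (t ++ "1" :: v) = gbF t ++ (0 : Int) :: gbF v := by
  induction t with
  | nil => simp [gbF]
  | cons y t ih => simp only [List.cons_append, gbF, zrun_append_one, ih]

lemma zrun_replicate_append (k : Nat) (rest : List String) :
    zrun (List.replicate k "0" ++ rest) = k + zrun rest := by
  induction k with
  | zero => simp
  | succ k ih => simp only [List.replicate_succ, List.cons_append, zrun_cons_zero, ih]; omega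

lemma gbF_zeros (k : Nat) (rest : List String) (h : zrun rest = 0) :
    gbF (List.replicate k "0" ++ rest) = cd k ++ gbF rest := by
  induction k with
  | zero => simp [cd_zero]
  | succ k ih =>
      simp only [List.replicate_succ, List.cons_append, gbF]
      rw [zrun_replicate_append, h, ih, cd_succ]
      simp

lemma gbF_ones (k : Nat) (rest : List String) :
    gbF (List.replicate k "1" ++ rest) = List.replicate k (0 : Int) ++ gbF rest := by
  induction k with
  | zero => simp
  | succ k ih => simp [List.replicate_succ, gbF, ih]

-- A's scan (over the reversed list, with counter d) equals the forward spec with d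
-- pending zeros appended on the right.
lemma gbF_zeros_nil (d : Nat) : gbF (List.replicate d "0") = cd d := by
  have h := gbF_zeros d [] (by simp [zrun])
  simpa [gbF] using h

lemma gbCore_eq_gbF (r : List String) (d : Nat)
    (hk : ∀ x ∈ r, x = "0" ∨ x = "1") :
    (gbCore (d : Int) r).reverse ++ cd d = gbF (r.reverse ++ List.replicate d "0") := by
  induction r generalizing d with
  | nil => simp [gbCore, gbF_zeros_nil]
  | cons x r ih =>
      have hr : ∀ y ∈ r, y = "0" ∨ y = "1" := fun y hy => hk y (by simp [hy])
      rcases hk x (by simp) with h0 | h1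
      · subst h0
        rw [show gbCore (d : Int) ("0" :: r) = ((d : Int) + 1) :: gbCore ((d : Int) + 1) r from by
              simp [gbCore]]
        rw [List.reverse_cons, List.append_assoc,
            show ([((d : Int) + 1)] ++ cd d) = cd (d + 1) from by rw [cd_succ]; rfl]
        have ih' := ih (d + 1) hr
        push_cast at ih'
        rw [ih', List.reverse_cons, List.append_assoc]
        congr 1
      · subst h1
        rw [show gbCore (d : Int) ("1" :: r) = (0 : Int) :: gbCore 0 r from by simp [gbCore]]
        have ih' := ih 0 hr
        simp only [Nat.cast_zero, List.replicate_zero, List.append_nil, cd_zero] at ih'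
        rw [List.reverse_cons, List.reverse_cons, List.append_assoc, List.append_assoc,
            show (["1"] ++ List.replicate d "0") = "1" :: List.replicate d "0" from rfl,
            gbF_append_one, ← ih']
        simp [gbF_zeros_nil]

lemma gbRuns_eq_gbF (m : List String) (hk : ∀ x ∈ m, x = "0" ∨ x = "1") :
    gbRuns m = gbF m := by
  induction m using gbRuns.induct with
  | case1 => simp [gbRuns, gbF]
  | case2 x xs rest ih =>
      have hk' : ∀ y ∈ rest, y = "0" ∨ y = "1" := fun y hy =>
        hk y ((List.dropWhile_sublist _).mem hy)
      have hrest := ih hk'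
      have htake : (x :: xs).takeWhile (fun c => c == x) =
          List.replicate ((x :: xs).takeWhile (fun c => c == x)).length x := by
        apply List.eq_replicate_of_mem
        intro b hb
        have := List.mem_takeWhile_imp hb
        exact eq_of_beq this
      have hsplit : x :: xs =
          List.replicate ((x :: xs).takeWhile (fun c => c == x)).length x ++ rest := by
        conv_lhs => rw [← List.takeWhile_append_dropWhile (p := fun c => c == x) (l := x :: xs)]
        rw [← htake]
      have hhead : ∀ y, rest.head? = some y → (y == x) = false := by
        intro y hy
        have := List.head?_dropWhile_not (p := fun c => c == x) (l := x :: xs)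
        rw [hy] at this
        simpa using this
      rw [gbRuns, show List.dropWhile (fun c => c == x) (x :: xs) = rest from rfl, hrest]
      rcases hk x (by simp) with h0 | h1
      · subst h0
        rw [if_neg (by decide)]
        have hz : zrun rest = 0 := by
          cases hr : rest with
          | nil => simp [zrun]
          | cons y t =>
              apply zrun_cons_ne
              intro hy0
              have := hhead y (by rw [hr]; rfl)
              simp [hy0] at this
        conv_rhs => rw [hsplit]
        rw [gbF_zeros _ rest hz]
        rfl
      · subst h1
        rw [if_pos rfl]
        conv_rhs => rw [hsplit]
        rw [gbF_ones]

-- ===== VERDICT (by name: the statement is the Claim_ definition above) =====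
theorem g_back_spec : Claim_equal_g_back := by
  intro arr _
  unfold Spec_g_back g_back g_back_alt
  rw [PySem.List.slice?_none_none_neg_one]
  simp only [Option.getD_some, foldl_gbStep, List.nil_append]
  rw [gbCore_filter, List.filter_reverse]
  have hk : ∀ x ∈ arr.filter (fun c => c == "0" || c == "1"), x = "0" ∨ x = "1" := by
    intro x hx
    have := List.of_mem_filter hx
    simp only [Bool.or_eq_true, beq_iff_eq] at this
    exact this
  have h := gbCore_eq_gbF (arr.filter (fun c => c == "0" || c == "1")).reverse 0
    (by intro x hx; exact hk x (List.mem_reverse.mp hx))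
  simp only [Nat.cast_zero, cd_zero, List.append_nil, List.reverse_reverse,
    List.replicate_zero] at h
  rw [h, gbRuns_eq_gbF _ hk]
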